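-- pv_equiv track=rewrite | github.com/diegotpereira/Desafio-hackerrank-python | Algorithms/dynamic-programming/play-game/tests/bricksGame.py | bricksGame
-- ===== SOURCE A (Python) =====
-- def bricksGame(arr):
--
--     # Obtém o tamanho do array.
--     lenArr = len(arr)
--
--     # Cria uma lista `dp` para armazenar as pontuações máximas.
--     dp = [0] * (lenArr + 1)
--
--     # Inverte o array original, já que o cálculo começa a partir do final.
--     tijolos = list(reversed(arr))
--
--     # Cria uma lista `soma` para armazenar as somas acumulativas.
--     soma = [0] * (lenArr + 1)
--
--     for i in range(1, len(arr) + 1):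
--
--          # Calcula a soma acumulativa até a posição `i`.
--         soma[i] = soma[i - 1] + tijolos[i - 1]
--
--         # Se `i` for menor ou igual a 3,
--         if i <= 3:
--
--             # a pontuação máxima é a soma total até `i`.
--             dp[i] = sum(tijolos[:i])
--
--         else:
--
--             a = tijolos[i - 1] - dp[i - 1] + soma[i - 1]
--             b = sum(tijolos[i - 2:i]) - dp[i - 2] + soma[i - 2]
--             c = sum(tijolos[i - 3:i]) - dp[i - 3] + soma[i - 3]
--
--             # Calcula a pontuação máxima para a posição `i` com base nas próximas posições.
--             dp[i] = max(a, b, c)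
--
--     # Retorna a pontuação máxima para a posição final.
--     return dp[lenArr]
-- ===== SOURCE B (Python) =====
-- def bricksGame(arr):
--     # Game-theoretic "lead" (score-difference minimax) formulation: instead of the
--     # absolute-score DP with prefix sums, maintain the mover's lead on each suffix,
--     # computed from a rolling window of the raw brick values (A's take-all rule for
--     # the first three suffix lengths kept), and recover the score as (total+lead)//2.
--     total = 0
--     d1 = d2 = d3 = 0      # leads on the suffixes of length i-1, i-2, i-3
--     w1 = w2 = 0           # the two bricks just below the current top brick
--     i = 0
--     for x in reversed(arr):
--         i += 1
--         total += x
--         if i == 1: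
--             cur = x
--         elif i == 2:
--             cur = x + w1
--         elif i == 3:
--             cur = x + w1 + w2
--         else:
--             cur = max(x - d1, x + w1 - d2, x + w1 + w2 - d3)
--         d3, d2, d1 = d2, d1, cur
--         w2, w1 = w1, x
--     return (total + d1) // 2
-- ===== Notes on version B (the rewrite author's own statement) =====
-- stated objective: faster
-- what changed: Replaced A's absolute-score DP (dp and prefix-sum arrays, per-step list slicing and max of three slice-sum-minus-dp expressions) by the game-theoretic score-difference formulation: it maintains the mover's lead on each suffix from a rolling window of the raw brick values (no arrays, no slicing), and recovers the score at the end as (total + lead) // 2.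
import Mathlib
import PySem

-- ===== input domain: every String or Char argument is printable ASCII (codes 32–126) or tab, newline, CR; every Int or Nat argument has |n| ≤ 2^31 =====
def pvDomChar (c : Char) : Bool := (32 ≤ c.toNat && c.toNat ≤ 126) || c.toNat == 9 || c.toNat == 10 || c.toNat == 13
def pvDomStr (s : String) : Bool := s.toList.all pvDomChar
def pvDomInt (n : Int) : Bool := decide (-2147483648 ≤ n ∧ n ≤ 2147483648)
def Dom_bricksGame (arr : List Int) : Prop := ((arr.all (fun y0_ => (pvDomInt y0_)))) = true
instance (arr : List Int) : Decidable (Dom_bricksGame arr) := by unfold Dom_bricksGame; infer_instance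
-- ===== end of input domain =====

-- B replaces A's absolute-score DP (two prefix-sum/dp arrays, max of slice-sum expressions)
-- by the game-theoretic score-difference formulation: it maintains the mover's LEAD on each
-- suffix from a rolling window of raw brick values (no prefix sums, no arrays) and recovers
-- the score at the end as (total + lead) // 2.

-- ===== PORT A =====
-- loop body of A, step for step (soma updated before dp, exactly as the Python mutates)
def bgStepA (tijolos : List Int) (st : List Int × List Int) (i : Int) : List Int × List Int :=
  let dp := st.1
  let soma := st.2
  let soma := PySem.List.pySetD soma i (PySem.List.pyGetD soma (i - 1) 0 + PySem.List.pyGetD tijolos (i - 1) 0)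
  let dp :=
    if i ≤ 3 then
      PySem.List.pySetD dp i (PySem.List.slice tijolos none (some i)).sum
    else
      let a := PySem.List.pyGetD tijolos (i - 1) 0 - PySem.List.pyGetD dp (i - 1) 0 + PySem.List.pyGetD soma (i - 1) 0
      let b := (PySem.List.slice tijolos (some (i - 2)) (some i)).sum - PySem.List.pyGetD dp (i - 2) 0 + PySem.List.pyGetD soma (i - 2) 0
      let c := (PySem.List.slice tijolos (some (i - 3)) (some i)).sum - PySem.List.pyGetD dp (i - 3) 0 + PySem.List.pyGetD soma (i - 3) 0
      PySem.List.pySetD dp i (max a (max b c))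
  (dp, soma)

def bricksGame (arr : List Int) : Int :=
  let lenArr : Int := arr.length
  let dp : List Int := List.replicate (arr.length + 1) 0
  let tijolos : List Int := arr.reverse
  let soma : List Int := List.replicate (arr.length + 1) 0
  let st := (PySem.List.pyRange 1 (lenArr + 1) 1).foldl (bgStepA tijolos) (dp, soma)
  PySem.List.pyGetD st.1 lenArr 0

-- ===== PORT B =====
-- loop body of B: state (i, total, d1, d2, d3, w1, w2)
def bgStepB (st : Int × Int × Int × Int × Int × Int × Int) (x : Int) :
    Int × Int × Int × Int × Int × Int × Int :=
  match st with
  | (i, total, d1, d2, d3, w1, _w2) =>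
    let i := i + 1
    let total := total + x
    let cur :=
      if i = 1 then x
      else if i = 2 then x + w1
      else if i = 3 then x + w1 + _w2
      else max (x - d1) (max (x + w1 - d2) (x + w1 + _w2 - d3))
    (i, total, cur, d1, d2, x, w1)

def bricksGame_alt (arr : List Int) : Int :=
  let st := arr.reverse.foldl bgStepB (0, 0, 0, 0, 0, 0, 0)
  PySem.Int.floordiv (st.2.1 + st.2.2.1) 2

-- ===== PRECONDITION & SPEC =====
def Spec_bricksGame (arr : List Int) (out : Int) : Prop := out = bricksGame_alt arr
instance (arr : List Int) (out : Int) : Decidable (Spec_bricksGame arr out) := by unfold Spec_bricksGame; infer_instance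

-- ===== CLAIM (what is proved, stated in full; the proofs are below) =====
def Claim_equal_bricksGame : Prop := ∀ (arr : List Int), Dom_bricksGame arr → Spec_bricksGame arr (bricksGame arr)

-- ===== LEMMAS AND PROOFS =====

-- prefix sums of t: pvS t k = sum of the first k elements
def pvS (t : List Int) : Nat → Int
  | 0 => 0
  | k + 1 => pvS t k + t.getD k 0

-- the dp recurrence A computes
def pvD (t : List Int) : Nat → Int
  | 0 => 0
  | 1 => pvS t 1
  | 2 => pvS t 2
  | 3 => pvS t 3
  | (k + 4) => pvS t (k + 4) - min (pvD t (k + 3)) (min (pvD t (k + 2)) (pvD t (k + 1)))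

-- the mover's lead B maintains
def pvL (t : List Int) (k : Nat) : Int := 2 * pvD t k - pvS t k

-- element of t at distance m below the current position k (0 if not yet available)
def pvW (t : List Int) (k m : Nat) : Int := if m ≤ k then t.getD (k - m) 0 else 0

lemma pvS_eq_sum_take (t : List Int) (m : Nat) : pvS t m = (t.take m).sum := by
  induction m with
  | zero => simp [pvS]
  | succ k ih =>
    rw [pvS, ih]
    by_cases h : k < t.length
    · rw [List.take_add_one, List.sum_append]
      simp [List.getD, List.getElem?_eq_getElem h]
    · have hn : t[k]? = none := List.getElem?_eq_none (by omega)
      rw [List.take_of_length_le (by omega), List.take_of_length_le (by omega)]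
      simp [List.getD, hn]

lemma sum_drop_take (t : List Int) (a m : Nat) :
    ((t.drop a).take m).sum = pvS t (a + m) - pvS t a := by
  rw [pvS_eq_sum_take, pvS_eq_sum_take, List.take_add, List.sum_append]
  ring

lemma getD_set_self (xs : List Int) (m : Nat) (v d : Int) (h : m < xs.length) :
    (xs.set m v).getD m d = v := by
  simp [List.getD, h]

lemma getD_set_ne (xs : List Int) (m j : Nat) (v d : Int) (h : j ≠ m) :
    (xs.set m v).getD j d = xs.getD j d := by
  simp [List.getD, List.getElem?_set_ne (by omega : m ≠ j)]

-- one iteration of A's loop, on a state that satisfies the invariant up to k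
lemma bgStepA_eq (t dp soma : List Int) (k : Nat) (hk : k < t.length)
    (hdp : ∀ j, j ≤ k → dp.getD j 0 = pvD t j) (hsoma : ∀ j, j ≤ k → soma.getD j 0 = pvS t j) :
    bgStepA t (dp, soma) ((k + 1 : Nat) : Int)
      = (dp.set (k + 1) (pvD t (k + 1)), soma.set (k + 1) (pvS t (k + 1))) := by
  have e1 : ((k + 1 : Nat) : Int) - 1 = ((k : Nat) : Int) := by push_cast; ring
  simp only [bgStepA, e1, PySem.List.pyGetD_natCast, PySem.List.pySetD_natCast]
  have hsomaset : soma.set (k+1) (soma.getD k 0 + t.getD k 0) = soma.set (k+1) (pvS t (k+1)) := by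
    rw [hsoma k (le_refl _), pvS]
  rw [hsomaset]
  by_cases h3 : k + 1 ≤ 3
  · rw [if_pos (by exact_mod_cast Int.ofNat_le.mpr h3)]
    have : (PySem.List.slice t none (some ((k+1 : Nat) : Int))).sum = pvD t (k+1) := by
      rw [PySem.List.slice_to_natCast, ← pvS_eq_sum_take]
      have hk2 : k ≤ 2 := by omega
      interval_cases k <;> rfl
    rw [this]
  · rw [if_neg (by omega)]
    obtain ⟨j, rfl⟩ : ∃ j, k = j + 3 := ⟨k - 3, by omega⟩
    have e2 : ((j + 3 + 1 : Nat) : Int) - 2 = ((j + 2 : Nat) : Int) := by push_cast; ring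
    have e3 : ((j + 3 + 1 : Nat) : Int) - 3 = ((j + 1 : Nat) : Int) := by push_cast; ring
    rw [e2, e3]
    simp only [PySem.List.pyGetD_natCast]
    have hs1 : ∀ a : Nat, PySem.List.slice t (some ((a : Nat) : Int)) (some ((j + 3 + 1 : Nat) : Int))
        = (t.drop a).take (j + 3 + 1 - a) := by
      intro a
      have := PySem.List.slice_natCast t a (j + 3 + 1)
      simpa using this
    rw [hs1, hs1, sum_drop_take, sum_drop_take]
    rw [getD_set_ne _ _ _ _ _ (by omega), getD_set_ne _ _ _ _ _ (by omega),
        getD_set_ne _ _ _ _ _ (by omega)]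
    rw [hdp (j+3) (le_refl _), hdp (j+2) (by omega), hdp (j+1) (by omega),
        hsoma (j+3) (by omega), hsoma (j+2) (by omega), hsoma (j+1) (by omega)]
    have e4 : j + 2 + (j + 3 + 1 - (j + 2)) = j + 4 := by omega
    have e5 : j + 1 + (j + 3 + 1 - (j + 1)) = j + 4 := by omega
    rw [e4, e5]
    have hv : t.getD (j+3) 0 = pvS t (j + 4) - pvS t (j + 3) := by
      rw [pvS]; ring
    rw [hv]
    have hD : pvD t (j + 3 + 1) = pvS t (j + 4) - min (pvD t (j + 3)) (min (pvD t (j + 2)) (pvD t (j + 1))) := rfl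
    rw [hD]
    have hS : pvS t (j + 3 + 1) = pvS t (j + 4) := rfl
    rw [hS]
    refine congrArg₂ Prod.mk ?_ rfl
    exact congrArg (dp.set (j + 3 + 1)) (by omega)

-- A's loop invariant
lemma bgA_inv (t : List Int) (m : Nat) : ∀ (k : Nat) (dp soma : List Int), m = t.length - k →
    k ≤ t.length → dp.length = t.length + 1 → soma.length = t.length + 1 →
    (∀ j, j ≤ k → dp.getD j 0 = pvD t j) → (∀ j, j ≤ k → soma.getD j 0 = pvS t j) →
    ((PySem.List.pyRange (((k : Nat) : Int) + 1) (((t.length : Nat) : Int) + 1) 1).foldl (bgStepA t) (dp, soma)).1.getD t.length 0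
      = pvD t t.length := by
  induction m with
  | zero =>
    intro k dp soma hm hk hdl hsl hdp hsoma
    have hkl : k = t.length := by omega
    subst hkl
    rw [PySem.List.pyRange_one_eq_nil (by omega)]
    simpa using hdp t.length (le_refl _)
  | succ n ih =>
    intro k dp soma hm hk hdl hsl hdp hsoma
    have hlt : k < t.length := by omega
    rw [PySem.List.pyRange_one_cons (by omega : ((k : Nat) : Int) + 1 < ((t.length : Nat) : Int) + 1),
      List.foldl_cons]
    have hk1 : ((k : Nat) : Int) + 1 = ((k + 1 : Nat) : Int) := by push_cast; ring
    rw [hk1, bgStepA_eq t dp soma k hlt hdp hsoma]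
    have := ih (k + 1) (dp.set (k + 1) (pvD t (k + 1))) (soma.set (k + 1) (pvS t (k + 1)))
      (by omega) (by omega) (by simp [hdl]) (by simp [hsl])
      (by
        intro j hj
        by_cases hje : j = k + 1
        · subst hje; exact getD_set_self _ _ _ _ (by omega)
        · rw [getD_set_ne _ _ _ _ _ hje]; exact hdp j (by omega))
      (by
        intro j hj
        by_cases hje : j = k + 1
        · subst hje; exact getD_set_self _ _ _ _ (by omega)
        · rw [getD_set_ne _ _ _ _ _ hje]; exact hsoma j (by omega))
    rw [← hk1] at this
    exact this

-- evaluate A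
lemma bricksGame_eq (arr : List Int) : bricksGame arr = pvD arr.reverse arr.reverse.length := by
  unfold bricksGame
  have h := bgA_inv arr.reverse arr.reverse.length 0
    (List.replicate (arr.length + 1) 0) (List.replicate (arr.length + 1) 0)
    (by omega) (by omega) (by simp) (by simp)
    (by intro j hj; interval_cases j; simp [pvD, List.getD])
    (by intro j hj; interval_cases j; simp [pvS, List.getD])
  simp only [List.length_reverse] at h
  have h0 : ((0 : Nat) : Int) + 1 = 1 := by norm_num
  rw [h0] at h
  rw [PySem.List.pyGetD_natCast, h, List.length_reverse]

-- B's loop invariant: after k steps the state is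
-- (k, prefix sum, lead k, lead (k-1), lead (k-2), last element, second-to-last element)
lemma bgB_inv (t : List Int) (m : Nat) : ∀ (k : Nat), m = t.length - k → k ≤ t.length →
    (t.drop k).foldl bgStepB
      ((k : Int), pvS t k, pvL t k, pvL t (k - 1), pvL t (k - 2), pvW t k 1, pvW t k 2)
    = ((t.length : Int), pvS t t.length, pvL t t.length, pvL t (t.length - 1),
        pvL t (t.length - 2), pvW t t.length 1, pvW t t.length 2) := by
  induction m with
  | zero =>
    intro k hm hk
    have hkl : k = t.length := by omega
    subst hkl
    simp
  | succ n ih =>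
    intro k hm hk
    have hlt : k < t.length := by omega
    rw [List.drop_eq_getElem_cons hlt, List.foldl_cons]
    have hgd : t.getD k 0 = t[k] := by simp [List.getD, List.getElem?_eq_getElem hlt]
    have hgd' : t[k]?.getD 0 = t[k] := by rw [List.getElem?_eq_getElem hlt]; rfl
    have hstep : bgStepB ((k : Int), pvS t k, pvL t k, pvL t (k - 1), pvL t (k - 2), pvW t k 1, pvW t k 2) t[k]
        = (((k + 1 : Nat) : Int), pvS t (k + 1), pvL t (k + 1), pvL t ((k + 1) - 1),
            pvL t ((k + 1) - 2), pvW t (k + 1) 1, pvW t (k + 1) 2) := by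
      show (((k : Int) + 1), pvS t k + t[k],
        (if (k : Int) + 1 = 1 then t[k]
         else if (k : Int) + 1 = 2 then t[k] + pvW t k 1
         else if (k : Int) + 1 = 3 then t[k] + pvW t k 1 + pvW t k 2
         else max (t[k] - pvL t k) (max (t[k] + pvW t k 1 - pvL t (k - 1))
              (t[k] + pvW t k 1 + pvW t k 2 - pvL t (k - 2)))),
        pvL t k, pvL t (k - 1), t[k], pvW t k 1) = _
      have hs : pvS t k + t[k] = pvS t (k + 1) := by rw [pvS, hgd]
      have hw1 : pvW t (k + 1) 1 = t[k] := by
        unfold pvW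
        rw [if_pos (by omega : 1 ≤ k + 1), (by omega : k + 1 - 1 = k), hgd]
      have hw2 : pvW t (k + 1) 2 = pvW t k 1 := by
        unfold pvW
        rcases Nat.eq_zero_or_pos k with h0 | h0
        · subst h0; norm_num
        · have e : k + 1 - 2 = k - 1 := by omega
          rw [if_pos (by omega), if_pos (by omega), e]
      have hcur : (if (k : Int) + 1 = 1 then t[k]
         else if (k : Int) + 1 = 2 then t[k] + pvW t k 1
         else if (k : Int) + 1 = 3 then t[k] + pvW t k 1 + pvW t k 2
         else max (t[k] - pvL t k) (max (t[k] + pvW t k 1 - pvL t (k - 1))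
              (t[k] + pvW t k 1 + pvW t k 2 - pvL t (k - 2)))) = pvL t (k + 1) := by
        by_cases h1 : k = 0
        · subst h1
          rw [if_pos (by norm_num)]
          simp only [pvL, pvD, pvS, List.getD]
          rw [hgd']
          ring
        by_cases h2 : k = 1
        · subst h2
          rw [if_neg (by omega), if_pos (by norm_num)]
          simp only [pvL, pvD, pvW, pvS, List.getD]
          rw [hgd']
          norm_num
          ring
        by_cases h3 : k = 2
        · subst h3
          rw [if_neg (by omega), if_neg (by omega), if_pos (by norm_num)]
          simp only [pvL, pvD, pvW, pvS, List.getD]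
          rw [hgd']
          norm_num
          ring
        · rw [if_neg (by omega), if_neg (by omega), if_neg (by omega)]
          obtain ⟨j, rfl⟩ : ∃ j, k = j + 3 := ⟨k - 3, by omega⟩
          have hwa : pvW t (j + 3) 1 = t.getD (j + 2) 0 := by simp [pvW]
          have hwb : pvW t (j + 3) 2 = t.getD (j + 1) 0 := by simp [pvW]
          have hL : pvL t (j + 3 + 1) = pvS t (j + 4)
              - 2 * min (pvD t (j + 3)) (min (pvD t (j + 2)) (pvD t (j + 1))) := by
            unfold pvL
            rw [show pvD t (j + 3 + 1) = pvS t (j + 4)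
              - min (pvD t (j + 3)) (min (pvD t (j + 2)) (pvD t (j + 1))) from rfl]
            ring
          have hS4 : pvS t (j + 4) = pvS t (j + 3) + t[j + 3] := by rw [pvS, hgd]
          have hS3 : pvS t (j + 3) = pvS t (j + 2) + t.getD (j + 2) 0 := by rw [pvS]
          have hS2 : pvS t (j + 2) = pvS t (j + 1) + t.getD (j + 1) 0 := by rw [pvS]
          rw [hwa, hwb, hL]
          have e1 : (j + 3 : Nat) - 1 = j + 2 := by omega
          have e2 : (j + 3 : Nat) - 2 = j + 1 := by omega
          rw [e1, e2]
          unfold pvL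
          omega
      rw [hs, hw1, hw2, hcur]
      have ei : ((k : Int) + 1) = ((k + 1 : Nat) : Int) := by push_cast; ring
      rw [ei]
      have ea : (k + 1 : Nat) - 1 = k := by omega
      have eb : (k + 1 : Nat) - 2 = k - 1 := by omega
      rw [ea, eb]
    rw [hstep]
    exact ih (k + 1) (by omega) (by omega)

-- evaluate B
lemma bricksGame_alt_eq (arr : List Int) : bricksGame_alt arr = pvD arr.reverse arr.reverse.length := by
  unfold bricksGame_alt
  have h := bgB_inv arr.reverse arr.reverse.length 0 (by omega) (by omega)
  simp only [List.drop_zero] at h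
  have h0 : ((0 : Nat) : Int) = 0 := rfl
  have hL0 : pvL arr.reverse 0 = 0 := by simp [pvL, pvD, pvS]
  have hW0 : ∀ m, 0 < m → pvW arr.reverse 0 m = 0 := by
    intro m hm; simp [pvW, Nat.not_le.mpr hm]
  simp only [Nat.zero_sub, h0, hL0, hW0 1 (by omega), hW0 2 (by omega), pvS] at h
  rw [h]
  show PySem.Int.floordiv (pvS arr.reverse arr.reverse.length + pvL arr.reverse arr.reverse.length) 2
      = pvD arr.reverse arr.reverse.length
  unfold pvL
  have : pvS arr.reverse arr.reverse.length + (2 * pvD arr.reverse arr.reverse.length - pvS arr.reverse arr.reverse.length)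
      = 2 * pvD arr.reverse arr.reverse.length := by ring
  rw [this]
  simp [PySem.Int.floordiv, Int.mul_fdiv_cancel_left _ (by norm_num : (2 : Int) ≠ 0)]

-- ===== VERDICT (by name: the statement is the Claim_ definition above) =====
theorem bricksGame_spec : Claim_equal_bricksGame := by
  intro arr _hdom
  unfold Spec_bricksGame
  rw [bricksGame_eq, bricksGame_alt_eq]
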